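-- pv_equiv track=rewrite | github.com/ayushpatel497/Daily_POTD | Day308_2025/Q308_Leetcode.py | getXSum
-- ===== SOURCE A (Python) =====
-- import heapq
--
-- def getXSum(frequency, x):
--     max_heap = [(-freq, num) for num, freq in frequency.items()]
--     heapq.heapify(max_heap)
--
--     total = 0
--     while x > 0 and max_heap:
--         freq, num = heapq.heappop(max_heap)
--         total += (-freq) * num
--         x -= 1
--     return total
-- ===== SOURCE B (Python) =====
-- def getXSum(frequency, x):
--     items = sorted(frequency.items(), key=lambda kv: (-kv[1], kv[0]))
--     n = max(x, 0)
--     return sum(freq * num for num, freq in items[:n])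
-- ===== Notes on version B (the rewrite author's own statement) =====
-- stated objective: simpler
-- what changed: Replaces the heap (heapify + repeated heappop loop with a mutable counter) by one sorted() call on the same (-freq, num) key followed by a sum over the first max(x,0) items.
import Mathlib
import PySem

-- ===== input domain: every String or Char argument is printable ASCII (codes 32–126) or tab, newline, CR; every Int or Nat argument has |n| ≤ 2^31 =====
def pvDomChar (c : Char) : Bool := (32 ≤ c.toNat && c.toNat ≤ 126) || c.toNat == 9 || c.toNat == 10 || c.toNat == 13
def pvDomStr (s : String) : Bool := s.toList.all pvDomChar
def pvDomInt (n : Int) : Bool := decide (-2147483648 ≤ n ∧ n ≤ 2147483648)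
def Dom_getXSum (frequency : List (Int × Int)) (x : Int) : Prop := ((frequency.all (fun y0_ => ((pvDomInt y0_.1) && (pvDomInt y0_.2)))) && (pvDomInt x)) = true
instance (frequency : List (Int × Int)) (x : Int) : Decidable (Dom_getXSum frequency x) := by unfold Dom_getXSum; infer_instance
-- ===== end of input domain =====

-- B replaces A's heap (heapify + repeated heappop) by a single sort on the same (-freq, num) key
-- and a sum over the first max(x, 0) items: a simpler, loop-free decomposition of the same result.


-- ===== PORT A =====
-- heapq.heapify / heappop are ported as extraction of the least remaining pair under
-- Python's tuple '<' (lexicographic; modelled by 'toLex' on Int × Int). This is exact on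
-- every value the Python observes: the heap holds the priority pairs (-freq, num)
-- themselves, so each heappop returns exactly the lexicographically least remaining pair
-- (ties are identical pairs), and the heap's internal layout is never observed otherwise.
def getXSum_loop (heap : List (Int × Int)) (x : Int) (total : Int) : Int :=
  if _hx : x > 0 then
    match hm : PySem.List.min? heap (fun p => toLex p) with
    | none => total
    | some m => getXSum_loop (heap.erase m) (x - 1) (total + (-m.1) * m.2)
  else total
termination_by heap.length
decreasing_by
  have hmem := PySem.List.min?_mem hm
  have := List.length_erase_of_mem hmem
  have := List.length_pos_of_mem hmem
  omega

def getXSum (frequency : List (Int × Int)) (x : Int) : Int :=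
  getXSum_loop (frequency.map (fun p => (-p.2, p.1))) x 0

-- ===== PORT B =====
def getXSum_alt (frequency : List (Int × Int)) (x : Int) : Int :=
  let items := PySem.List.sorted frequency (fun kv => toLex (-kv.2, kv.1)) false
  let n : Int := max x 0
  ((PySem.List.slice items none (some n)).map (fun kv => kv.2 * kv.1)).sum

-- ===== PRECONDITION & SPEC =====
def Spec_getXSum (frequency : List (Int × Int)) (x : Int) (out : Int) : Prop := out = getXSum_alt frequency x
instance (frequency : List (Int × Int)) (x : Int) (out : Int) : Decidable (Spec_getXSum frequency x out) := by unfold Spec_getXSum; infer_instance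

-- ===== CLAIM (what is proved, stated in full; the proofs are below) =====
def Claim_equal_getXSum : Prop := ∀ (frequency : List (Int × Int)) (x : Int), Dom_getXSum frequency x → Spec_getXSum frequency x (getXSum frequency x)

-- ===== LEMMAS AND PROOFS =====

-- popping the minimum off the front: sorted h = m :: sorted (h.erase m)
lemma sorted_cons_min (h : List (Int × Int)) (m : Int × Int)
    (hm : PySem.List.min? h (fun p => toLex p) = some m) :
    PySem.List.sorted h (fun p => toLex p) false
      = m :: PySem.List.sorted (h.erase m) (fun p => toLex p) false := by
  have hmem := PySem.List.min?_mem hm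
  refine PySem.List.eq_of_perm_of_pairwise_le_of_injective (fun p => toLex p)
    (fun a b hab => toLex.injective hab) ?_ ?_ ?_
  · exact (PySem.List.sorted_perm h _ false).trans
      ((List.perm_cons_erase hmem).trans
        ((PySem.List.sorted_perm (h.erase m) _ false).symm.cons m))
  · exact PySem.List.sorted_pairwise h _
  · refine List.pairwise_cons.2 ⟨fun y hy => ?_, PySem.List.sorted_pairwise _ _⟩
    exact PySem.List.min?_isMin hm y (List.mem_of_mem_erase ((PySem.List.mem_sorted _ _ _ _).1 hy))

-- the pop loop computes total + the weighted sum of the first x.toNat sorted pairs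
lemma getXSum_loop_eq (heap : List (Int × Int)) (x total : Int) :
    getXSum_loop heap x total
      = total + (((PySem.List.sorted heap (fun p => toLex p) false).take x.toNat).map
          (fun m => (-m.1) * m.2)).sum := by
  induction hn : heap.length using Nat.strong_induction_on generalizing heap x total with
  | _ n ih =>
  rw [getXSum_loop]
  split_ifs with hx
  · cases hm : PySem.List.min? heap (fun p => toLex p) with
    | none =>
      have hnil : heap = [] := (PySem.List.min?_eq_none_iff heap _).1 hm
      subst hnil
      simp [PySem.List.sorted]
    | some m =>
      have hmem := PySem.List.min?_mem hm
      have hlen := List.length_erase_of_mem hmem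
      have hpos := List.length_pos_of_mem hmem
      dsimp only
      rw [ih (heap.erase m).length (by omega) _ _ _ rfl, sorted_cons_min heap m hm]
      have hx' : x.toNat = (x - 1).toNat + 1 := by omega
      rw [hx', List.take_succ_cons, List.map_cons, List.sum_cons]
      ring
  · have h0 : x.toNat = 0 := by omega
    simp [h0]

-- sorting the (-freq, num) pairs = mapping the sort of the items by the same key
lemma sorted_map_neg (frequency : List (Int × Int)) :
    PySem.List.sorted (frequency.map (fun p => ((-p.2 : Int), p.1))) (fun p => toLex p) false
      = (PySem.List.sorted frequency (fun kv => toLex (-kv.2, kv.1)) false).map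
          (fun p => ((-p.2 : Int), p.1)) := by
  refine PySem.List.eq_of_perm_of_pairwise_le_of_injective (fun p => toLex p)
    (fun a b hab => toLex.injective hab) ?_ ?_ ?_
  · exact (PySem.List.sorted_perm _ _ false).trans
      ((PySem.List.sorted_perm frequency _ false).symm.map _)
  · exact PySem.List.sorted_pairwise _ _
  · exact List.pairwise_map.2 (PySem.List.sorted_pairwise frequency _)

-- ===== VERDICT (by name: the statement is the Claim_ definition above) =====
theorem getXSum_spec : Claim_equal_getXSum := by
  intro frequency x _
  unfold Spec_getXSum getXSum getXSum_alt
  show _ = ((PySem.List.slice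
      (PySem.List.sorted frequency (fun kv => toLex (-kv.2, kv.1)) false) none
      (some (max x 0))).map (fun kv => kv.2 * kv.1)).sum
  rw [getXSum_loop_eq, sorted_map_neg]
  rw [PySem.List.slice_to _ (by omega : (0:Int) ≤ max x 0)]
  have hn : (max x 0).toNat = x.toNat := by omega
  rw [hn, zero_add, ← List.map_take, List.map_map]
  refine congrArg List.sum (List.map_congr_left (fun kv _ => ?_))
  simp
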